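-- pv_equiv track=rewrite | github.com/MateiTiplea/PrimeProvenance-ArP | scripts/europeana_heritage_parser.py | _get_lang_value_with_lang
-- ===== SOURCE A (Python) =====
-- from typing import Any, Dict, List, Optional
--
-- def _get_lang_value_with_lang(
--     lang_dict: Dict[str, List[str]],
--     preferred_langs: List[str] = None,
--     strict_english: bool = False,
--     ignore_urls: bool = False,
-- ) -> tuple:
--     """
--     Extract value from language-aware field with language tracking.
--
--     Args:
--         lang_dict: Dictionary with language codes as keys
--         preferred_langs: List of preferred language codes
--         strict_english: If True, only return English content, else None
--         ignore_urls: If True, skip values that look like URLs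
--
--     Returns:
--         Tuple of (value, language) or (None, None)
--     """
--     if not lang_dict:
--         return None, None
--
--     if preferred_langs is None:
--         preferred_langs = ["en", "def", ""]
--
--     def is_url(v):
--         return isinstance(v, str) and (
--             v.startswith("http://") or v.startswith("https://")
--         )
--
--     # Try preferred languages first
--     for lang in preferred_langs:
--         if lang in lang_dict:
--             values = lang_dict[lang]
--             if values:
--                 # Iterate values to find one that satisfies ignore_urls
--                 candidates = values if isinstance(values, list) else [values]
--                 for val in candidates:
--                     if ignore_urls and is_url(val):
--                         continue
--                     return val, lang if lang else "en"
--
--     # If strict English mode, don't fall back to other languages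
--     if strict_english:
--         return None, None
--
--     # Fallback to any available language
--     for lang, values in lang_dict.items():
--         if values:
--             candidates = values if isinstance(values, list) else [values]
--             for val in candidates:
--                 if ignore_urls and is_url(val):
--                     continue
--                 return val, lang
--
--     return None, None
-- ===== SOURCE B (Python) =====
-- def _get_lang_value_with_lang(
--     lang_dict,
--     preferred_langs=None,
--     strict_english=False,
--     ignore_urls=False,
-- ):
--     """Argmin rewrite: one pass over the dict items; each entry with an
--     acceptable value is scored (preferred-language index, or an offset
--     insertion rank when fallback is allowed) against a precomputed preferred-language
--     rank map, and the minimal-rank candidate wins, instead of two sequential search phases."""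
--     if not lang_dict:
--         return None, None
--
--     if preferred_langs is None:
--         preferred_langs = ["en", "def", ""]
--
--     rank = {}
--     for i, lang in enumerate(preferred_langs):
--         rank.setdefault(lang, i)
--
--     offset = len(preferred_langs)
--     best = None  # (rank, value, label)
--     for i, (lang, values) in enumerate(lang_dict.items()):
--         candidates = values if isinstance(values, list) else [values]
--         hit = None
--         for v in candidates:
--             if ignore_urls and isinstance(v, str) and (
--                 v.startswith("http://") or v.startswith("https://")
--             ):
--                 continue
--             hit = v
--             break
--         if hit is None:
--             continue
--         r = rank.get(lang)
--         if r is not None: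
--             if best is None or r < best[0]:
--                 best = (r, hit, lang if lang else "en")
--         if not strict_english:
--             r = offset + i
--             if best is None or r < best[0]:
--                 best = (r, hit, lang)
--
--     if best is None:
--         return None, None
--     return best[1], best[2]
-- ===== Notes on version B (the rewrite author's own statement) =====
-- stated objective: alternative
-- what changed: Replaces A's two sequential search phases (scan preferred_langs probing the dict, then rescan all dict items as fallback) by a single pass over the dict items that scores every entry having an acceptable value with a numeric rank (first index in a precomputed preferred-language rank map, plus an offset insertion rank when fallback is allowed) and keeps the minimal-rank candidate.
import Mathlib
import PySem

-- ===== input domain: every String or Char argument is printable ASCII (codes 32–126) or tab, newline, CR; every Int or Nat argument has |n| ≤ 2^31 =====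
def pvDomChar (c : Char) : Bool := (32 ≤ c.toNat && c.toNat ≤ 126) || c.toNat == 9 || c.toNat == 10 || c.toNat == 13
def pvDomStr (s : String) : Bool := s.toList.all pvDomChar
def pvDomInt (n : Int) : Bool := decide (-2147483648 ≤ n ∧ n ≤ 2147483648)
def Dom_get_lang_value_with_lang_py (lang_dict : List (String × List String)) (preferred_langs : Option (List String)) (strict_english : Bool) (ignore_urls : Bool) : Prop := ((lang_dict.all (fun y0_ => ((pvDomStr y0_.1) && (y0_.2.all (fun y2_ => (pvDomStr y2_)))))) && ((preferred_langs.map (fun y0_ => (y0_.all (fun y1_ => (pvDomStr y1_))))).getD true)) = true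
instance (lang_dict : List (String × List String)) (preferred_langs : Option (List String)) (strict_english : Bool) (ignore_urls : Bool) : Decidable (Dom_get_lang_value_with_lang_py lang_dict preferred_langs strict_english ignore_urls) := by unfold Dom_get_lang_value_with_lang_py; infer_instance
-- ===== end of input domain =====

-- B replaces A's two sequential search phases by a single ranked pass over the dict items
-- keeping the minimal-rank acceptable candidate (different algorithm, similar cost).

-- ===== PORT A =====
-- is_url(v): v is a str here by the type, so only the prefix tests remain
def pvIsUrl (v : String) : Bool :=
  PySem.Str.startswith v "http://" || PySem.Str.startswith v "https://"

-- A's inner 'for val in candidates' loop (candidates = values, already a list)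
def pvA_inner (vals : List String) (ignore_urls : Bool) (label : String) :
    Option (Option String × Option String) :=
  match vals with
  | [] => none
  | v :: rest =>
    if ignore_urls && pvIsUrl v then pvA_inner rest ignore_urls label
    else some (some v, some label)

-- A's first loop: 'for lang in preferred_langs'
def pvA_pref (d : PySem.Dict String (List String)) (langs : List String)
    (ignore_urls : Bool) : Option (Option String × Option String) :=
  match langs with
  | [] => none
  | lang :: rest =>
    match d.get? lang with      -- 'if lang in lang_dict: values = lang_dict[lang]'
    | some values =>
      -- 'if values:' is subsumed: the inner loop on [] finds nothing
      match pvA_inner values ignore_urls (if lang == "" then "en" else lang) with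
      | some r => some r
      | none => pvA_pref d rest ignore_urls
    | none => pvA_pref d rest ignore_urls

-- A's fallback loop: 'for lang, values in lang_dict.items()'
def pvA_fallback (items : List (String × List String)) (ignore_urls : Bool) :
    Option (Option String × Option String) :=
  match items with
  | [] => none
  | (lang, values) :: rest =>
    match pvA_inner values ignore_urls lang with
    | some r => some r
    | none => pvA_fallback rest ignore_urls

def get_lang_value_with_lang_py (lang_dict : List (String × List String)) (preferred_langs : Option (List String)) (strict_english : Bool) (ignore_urls : Bool) : Option String × Option String :=
  let d := PySem.Dict.ofList lang_dict
  if d.items.isEmpty then (none, none)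
  else
    let pl := preferred_langs.getD ["en", "def", ""]
    match pvA_pref d pl ignore_urls with
    | some r => r
    | none =>
      if strict_english then (none, none)
      else
        match pvA_fallback d.items ignore_urls with
        | some r => r
        | none => (none, none)

-- ===== PORT B =====
-- Source B's inner 'hit = …' loop: first value that is not a skipped URL
def pvB_hit (ig : Bool) (vals : List String) : Option String :=
  match vals with
  | [] => none
  | v :: rest =>
    if ig && (PySem.Str.startswith v "http://" || PySem.Str.startswith v "https://") then
      pvB_hit ig rest
    else some v

-- 'rank = {}; for i, lang in enumerate(preferred_langs): rank.setdefault(lang, i)'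
def pvB_rank (pl : List String) : PySem.Dict String Int :=
  (PySem.List.enumerate pl 0).foldl (fun d p => d.setdefault p.2 p.1) PySem.Dict.empty

-- 'if best is None or rank < best[0]: best = (rank, hit, lab)'
def pvB_upd (best : Option (Int × String × String)) (rank : Int) (hit lab : String) :
    Option (Int × String × String) :=
  match best with
  | none => some (rank, hit, lab)
  | some b => if rank < b.1 then some (rank, hit, lab) else some b

-- body of Source B's 'for i, (lang, values) in enumerate(lang_dict.items())' loop
def pvB_step (rankd : PySem.Dict String Int) (offset : Int) (se ig : Bool)
    (best : Option (Int × String × String)) (p : Int × (String × List String)) :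
    Option (Int × String × String) :=
  match pvB_hit ig p.2.2 with
  | none => best
  | some hit =>
    -- 'r = rank.get(lang); if r is not None: …'
    let best1 :=
      match rankd.get? p.2.1 with
      | some r => pvB_upd best r hit (if p.2.1 == "" then "en" else p.2.1)
      | none => best
    if se then best1 else pvB_upd best1 (offset + p.1) hit p.2.1

def get_lang_value_with_lang_py_alt (lang_dict : List (String × List String)) (preferred_langs : Option (List String)) (strict_english : Bool) (ignore_urls : Bool) : Option String × Option String :=
  let d := PySem.Dict.ofList lang_dict
  if d.items.isEmpty then (none, none)
  else
    let pl := preferred_langs.getD ["en", "def", ""]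
    match (PySem.List.enumerate d.items 0).foldl
        (pvB_step (pvB_rank pl) (pl.length : Int) strict_english ignore_urls) none with
    | none => (none, none)
    | some b => (some b.2.1, some b.2.2)

-- ===== PRECONDITION & SPEC =====
def Spec_get_lang_value_with_lang_py (lang_dict : List (String × List String)) (preferred_langs : Option (List String)) (strict_english : Bool) (ignore_urls : Bool) (out : Option String × Option String) : Prop := out = get_lang_value_with_lang_py_alt lang_dict preferred_langs strict_english ignore_urls
instance (lang_dict : List (String × List String)) (preferred_langs : Option (List String)) (strict_english : Bool) (ignore_urls : Bool) (out : Option String × Option String) : Decidable (Spec_get_lang_value_with_lang_py lang_dict preferred_langs strict_english ignore_urls out) := by unfold Spec_get_lang_value_with_lang_py; infer_instance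

-- ===== CLAIM (what is proved, stated in full; the proofs are below) =====
def Claim_equal_get_lang_value_with_lang_py : Prop := ∀ (lang_dict : List (String × List String)) (preferred_langs : Option (List String)) (strict_english : Bool) (ignore_urls : Bool), Dom_get_lang_value_with_lang_py lang_dict preferred_langs strict_english ignore_urls → Spec_get_lang_value_with_lang_py lang_dict preferred_langs strict_english ignore_urls (get_lang_value_with_lang_py lang_dict preferred_langs strict_english ignore_urls)

-- ===== LEMMAS AND PROOFS =====

-- the fold step seen as a min-keeping step over explicit candidate triples
def pvMin (b : Option (Int × String × String)) (c : Int × String × String) :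
    Option (Int × String × String) := pvB_upd b c.1 c.2.1 c.2.2

-- the candidate triples one enumerated item contributes
def pvCands (pl : List String) (off : Int) (se ig : Bool)
    (p : Int × (String × List String)) : List (Int × String × String) :=
  match pvB_hit ig p.2.2 with
  | none => []
  | some hit =>
    (match PySem.List.index? pl p.2.1 with
     | some r => [((r : Int), hit, if p.2.1 == "" then "en" else p.2.1)]
     | none => [])
    ++ (if se then [] else [(off + p.1, hit, p.2.1)])

-- fallback-only candidates (what pvCands reduces to when no preferred lang can hit)
def pvFb (off : Int) (ig : Bool) (p : Int × (String × List String)) :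
    List (Int × String × String) :=
  match pvB_hit ig p.2.2 with
  | none => []
  | some hit => [(off + p.1, hit, p.2.1)]

-- 'lang qualifies in the preferred phase'
def pvQ (d : PySem.Dict String (List String)) (ig : Bool) (l : String) : Bool :=
  ((d.get? l).bind (pvB_hit ig)).isSome

-- the rank map holds each preferred language's first index
theorem pvB_rank_aux (x : String) :
    ∀ (pl : List String) (s : Int) (d : PySem.Dict String Int),
    ((PySem.List.enumerate pl s).foldl (fun d p => d.setdefault p.2 p.1) d).get? x
      = (match d.get? x with
         | some v => some v
         | none => (PySem.List.index? pl x).map (fun r => s + (r : Int))) := by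
  intro pl
  induction pl with
  | nil =>
    intro s d
    simp only [PySem.List.enumerate_nil, List.foldl_nil]
    cases d.get? x <;> simp [PySem.List.index?]
  | cons lang rest ih =>
    intro s d
    rw [PySem.List.enumerate_cons]
    simp only [List.foldl_cons]
    rw [ih]
    by_cases hx : x = lang
    · subst hx
      rw [PySem.Dict.get?_setdefault_self]
      cases hdx : d.get? x with
      | some v => simp [hdx]
      | none =>
        rw [PySem.List.index?_cons_self]
        simp [hdx]
    · rw [PySem.Dict.get?_setdefault_of_ne d s hx]
      cases hdx : d.get? x with
      | some v => simp
      | none =>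
        rw [PySem.List.index?_cons_of_ne rest (fun h => hx h.symm)]
        cases hrest : PySem.List.index? rest x with
        | none => simp [hdx, hrest]
        | some r =>
          simp [hdx, hrest]
          omega

theorem pvB_rank_get? (pl : List String) (x : String) :
    (pvB_rank pl).get? x = (PySem.List.index? pl x).map (fun r => (r : Int)) := by
  unfold pvB_rank
  rw [pvB_rank_aux]
  rw [PySem.Dict.get?_empty]
  cases PySem.List.index? pl x <;> simp

theorem pvB_step_eq (pl : List String) (off : Int) (se ig : Bool)
    (b : Option (Int × String × String)) (p : Int × (String × List String)) :
    pvB_step (pvB_rank pl) off se ig b p = (pvCands pl off se ig p).foldl pvMin b := by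
  unfold pvB_step pvCands
  rw [pvB_rank_get?]
  cases pvB_hit ig p.2.2 with
  | none => rfl
  | some hit =>
    cases PySem.List.index? pl p.2.1 <;> cases se <;>
      simp [pvMin, List.foldl_append]

theorem pvFold_eq (pl : List String) (off : Int) (se ig : Bool) :
    ∀ (l : List (Int × (String × List String))) (b : Option (Int × String × String)),
    l.foldl (pvB_step (pvB_rank pl) off se ig) b = (l.flatMap (pvCands pl off se ig)).foldl pvMin b := by
  intro l
  induction l with
  | nil => intro b; rfl
  | cons p rest ih =>
    intro b
    simp only [List.foldl_cons, List.flatMap_cons, List.foldl_append, pvB_step_eq, ih]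

theorem pvMin_keep (a : Int × String × String) :
    ∀ (C : List (Int × String × String)), (∀ c ∈ C, ¬ (c.1 < a.1)) →
    C.foldl pvMin (some a) = some a := by
  intro C
  induction C with
  | nil => intro _; rfl
  | cons c rest ih =>
    intro h
    have hc : ¬ (c.1 < a.1) := h c (List.mem_cons_self)
    simp only [List.foldl_cons, pvMin, pvB_upd, hc, if_neg hc]
    exact ih (fun c' hc' => h c' (List.mem_cons_of_mem _ hc'))

theorem pvMin_reach (c0 : Int × String × String) :
    ∀ (C : List (Int × String × String)), c0 ∈ C →
    (∀ c ∈ C, c0.1 ≤ c.1) → (∀ c ∈ C, c.1 = c0.1 → c = c0) →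
    ∀ (b : Option (Int × String × String)),
      (b = none ∨ ∃ a, b = some a ∧ c0.1 < a.1) →
      C.foldl pvMin b = some c0 := by
  intro C
  induction C with
  | nil => intro h; exact absurd h (List.not_mem_nil)
  | cons c rest ih =>
    intro hmem hmin huniq b hb
    by_cases hc : c = c0
    · subst hc
      have hstep : pvMin b c = some c := by
        rcases hb with h | ⟨a, ha, hlt⟩
        · simp [h, pvMin, pvB_upd]
        · simp [ha, pvMin, pvB_upd, hlt]
      simp only [List.foldl_cons, hstep]
      exact pvMin_keep c rest (fun c' hc' => by
        have := hmin c' (List.mem_cons_of_mem _ hc'); omega)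
    · have hmem' : c0 ∈ rest := by
        rcases List.mem_cons.mp hmem with h | h
        · exact absurd h.symm hc
        · exact h
      have hlt : c0.1 < c.1 := by
        have h1 := hmin c (List.mem_cons_self)
        rcases lt_or_eq_of_le h1 with h | h
        · exact h
        · exact absurd (huniq c (List.mem_cons_self) h.symm) hc
      have hstep : ∃ a, pvMin b c = some a ∧ c0.1 < a.1 := by
        rcases hb with h | ⟨a, ha, halt⟩
        · exact ⟨c, by simp [h, pvMin, pvB_upd], hlt⟩
        · by_cases hca : c.1 < a.1
          · exact ⟨c, by simp [ha, pvMin, pvB_upd, hca], hlt⟩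
          · exact ⟨a, by simp [ha, pvMin, pvB_upd, hca], halt⟩
      obtain ⟨a, ha, halt⟩ := hstep
      simp only [List.foldl_cons, ha]
      exact ih hmem' (fun c' hc' => hmin c' (List.mem_cons_of_mem _ hc'))
        (fun c' hc' => huniq c' (List.mem_cons_of_mem _ hc'))
        (some a) (Or.inr ⟨a, rfl, halt⟩)

theorem pvA_inner_eq (vals : List String) (ig : Bool) (label : String) :
    pvA_inner vals ig label = (pvB_hit ig vals).map (fun v => (some v, some label)) := by
  induction vals with
  | nil => rfl
  | cons v rest ih =>
    simp only [pvA_inner, pvB_hit, pvIsUrl]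
    split_ifs with h
    · exact ih
    · rfl

theorem pvA_pref_eq (d : PySem.Dict String (List String)) (ig : Bool) :
    ∀ (pl : List String),
    pvA_pref d pl ig = (pl.find? (pvQ d ig)).bind (fun l =>
      ((d.get? l).bind (pvB_hit ig)).map
        (fun v => (some v, some (if l == "" then "en" else l)))) := by
  intro pl
  induction pl with
  | nil => rfl
  | cons lang rest ih =>
    simp only [pvA_pref, List.find?]
    cases hd : d.get? lang with
    | none =>
      have hq : pvQ d ig lang = false := by simp [pvQ, hd]
      simp [hq, ih]
    | some values =>
      dsimp only
      rw [pvA_inner_eq]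
      cases hh : pvB_hit ig values with
      | none =>
        have hq : pvQ d ig lang = false := by simp [pvQ, hd, hh]
        simp [hq, ih]
      | some v =>
        have hq : pvQ d ig lang = true := by simp [pvQ, hd, hh]
        simp [hq, hd, hh]

-- every fallback candidate from start index s has rank ≥ off + s
theorem pvFb_lb (off : Int) (ig : Bool) :
    ∀ (items : List (String × List String)) (s : Int) (c : Int × String × String),
    c ∈ (PySem.List.enumerate items s).flatMap (pvFb off ig) → off + s ≤ c.1 := by
  intro items
  induction items with
  | nil => intro s c h; simp [PySem.List.enumerate_nil] at h
  | cons e rest ih =>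
    intro s c h
    rw [PySem.List.enumerate_cons] at h
    simp only [List.flatMap_cons, List.mem_append] at h
    rcases h with h | h
    · unfold pvFb at h
      cases hh : pvB_hit ig e.2 with
      | none => simp [hh] at h
      | some v =>
        simp only [hh, List.mem_singleton] at h
        subst h
        simp
    · have := ih (s + 1) c h; omega

-- the min-fold over fallback-only candidates is A's fallback scan
theorem pvFb_fold (off : Int) (ig : Bool) :
    ∀ (items : List (String × List String)) (s : Int),
    (match ((PySem.List.enumerate items s).flatMap (pvFb off ig)).foldl pvMin none with
     | none => ((none : Option String), (none : Option String))
     | some b => (some b.2.1, some b.2.2))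
    = (match pvA_fallback items ig with
       | some r => r
       | none => (none, none)) := by
  intro items
  induction items with
  | nil => intro s; simp [PySem.List.enumerate_nil, pvA_fallback]
  | cons e rest ih =>
    intro s
    obtain ⟨lang, values⟩ := e
    rw [PySem.List.enumerate_cons]
    simp only [List.flatMap_cons, pvA_fallback]
    rw [pvA_inner_eq]
    cases hh : pvB_hit ig values with
    | none => simpa [pvFb, hh] using ih (s + 1)
    | some v =>
      have hkeep : ((PySem.List.enumerate rest (s + 1)).flatMap (pvFb off ig)).foldl
          pvMin (some (off + s, v, lang)) = some (off + s, v, lang) := by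
        apply pvMin_keep
        intro c hc
        have := pvFb_lb off ig rest (s + 1) c hc
        omega
      simp [pvFb, hh, pvMin, pvB_upd, hkeep]

-- ===== VERDICT helper: the main equivalence on non-empty dicts =====
theorem pv_main (d : PySem.Dict String (List String)) (pl : List String) (se ig : Bool)
    (hn : d.keys.Nodup) :
    (match pvA_pref d pl ig with
     | some r => r
     | none =>
       if se then (none, none)
       else match pvA_fallback d.items ig with
            | some r => r
            | none => (none, none))
    = (match (PySem.List.enumerate d.items 0).foldl
          (pvB_step (pvB_rank pl) (pl.length : Int) se ig) none with
       | none => (none, none)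
       | some b => (some b.2.1, some b.2.2)) := by
  rw [pvFold_eq, pvA_pref_eq]
  -- membership fact: items of an enumerated pair are real dict items
  have hmemit : ∀ p ∈ PySem.List.enumerate d.items 0, p.2 ∈ d.items ∧ 0 ≤ p.1 := by
    intro p hp
    rw [PySem.List.mem_enumerate_iff] at hp
    obtain ⟨k, hk, rfl⟩ := hp
    exact ⟨List.getElem_mem hk, by omega⟩
  cases hfind : pl.find? (pvQ d ig) with
  | some l =>
    -- preferred phase succeeds: the minimal-rank candidate is the preferred one
    rw [List.find?_eq_some_iff_append] at hfind
    obtain ⟨hQl, as, bs, hpl, hnotQ⟩ := hfind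
    subst hpl
    have hQl' := hQl
    simp only [pvQ, Option.isSome_iff_exists] at hQl'
    obtain ⟨v, hv⟩ := hQl'
    cases hd : d.get? l with
    | none => rw [hd] at hv; simp at hv
    | some vs =>
    rw [hd] at hv; simp only [Option.bind_some] at hv
    -- index of l in pl
    have hlmem : l ∈ as ++ l :: bs := by simp
    have hidx : ∃ r, PySem.List.index? (as ++ l :: bs) l = some r := by
      rw [← Option.isSome_iff_exists, PySem.List.index?_isSome_iff]; exact hlmem
    obtain ⟨r, hr⟩ := hidx
    obtain ⟨hrlen, hplr, hfirst⟩ := PySem.List.getElem_of_index?_eq_some hr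
    -- positions before as.length don't qualify; l sits at as.length
    have hAt : ∀ (j : Nat) (hj : j < (as ++ l :: bs).length), pvQ d ig ((as ++ l :: bs)[j]) = true → as.length ≤ j := by
      intro j hj hQj
      by_contra hlt
      push_neg at hlt
      have hja : (as ++ l :: bs)[j] = as[j]'(by omega) := by
        rw [List.getElem_append]
        rw [dif_pos (by omega)]
      have hmemas : (as ++ l :: bs)[j] ∈ as := hja ▸ List.getElem_mem _
      have := hnotQ _ hmemas
      simp [hQj] at this
    have hras : r = as.length := by
      have h1 : as.length ≤ r := hAt r hrlen (by rw [hplr]; exact hQl)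
      have h2 : ¬ (as.length < r) := by
        intro hlt
        have hlen : as.length < (as ++ l :: bs).length := by simp
        have : (as ++ l :: bs)[as.length] = l := by
          rw [List.getElem_append]
          rw [dif_neg (by omega)]
          simp
        exact hfirst as.length hlt (by rw [this])
      omega
    -- the winning candidate
    set c0 : Int × String × String := ((r : Int), v, if l == "" then "en" else l) with hc0
    have hitem : (l, vs) ∈ d.items := PySem.Dict.mem_items_of_get?_eq_some d hd
    obtain ⟨k, hk, hkeq⟩ := List.getElem_of_mem hitem
    have hpmem : ((k : Int), (l, vs)) ∈ PySem.List.enumerate d.items 0 := by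
      rw [PySem.List.mem_enumerate_iff]
      exact ⟨k, hk, by rw [hkeq]; norm_num⟩
    have hc0mem : c0 ∈ (PySem.List.enumerate d.items 0).flatMap
        (pvCands (as ++ l :: bs) ((as ++ l :: bs).length : Int) se ig) := by
      rw [List.mem_flatMap]
      refine ⟨((k : Int), (l, vs)), hpmem, ?_⟩
      simp only [pvCands, hv, hr]
      cases se <;> simp [hc0]
    -- minimality and uniqueness among all candidates
    have hbound : ∀ c ∈ (PySem.List.enumerate d.items 0).flatMap
        (pvCands (as ++ l :: bs) ((as ++ l :: bs).length : Int) se ig), c0.1 ≤ c.1 ∧ (c.1 = c0.1 → c = c0) := by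
      intro c hc
      rw [List.mem_flatMap] at hc
      obtain ⟨p, hp, hcp⟩ := hc
      obtain ⟨hp2, hp1⟩ := hmemit p hp
      unfold pvCands at hcp
      cases hh : pvB_hit ig p.2.2 with
      | none => simp [hh] at hcp
      | some hit =>
        rw [hh] at hcp
        simp only [List.mem_append] at hcp
        have hget : d.get? p.2.1 = some p.2.2 := by
          have : (p.2.1, p.2.2) ∈ d.items := by simpa using hp2
          exact PySem.Dict.get?_of_mem_items d this hn
        rcases hcp with hcp | hcp
        · -- preferred candidate
          cases hr' : PySem.List.index? (as ++ l :: bs) p.2.1 with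
          | none => rw [hr'] at hcp; simp at hcp
          | some r' =>
            rw [hr'] at hcp
            simp only [List.mem_singleton] at hcp
            obtain ⟨hrlen', hplr', _⟩ := PySem.List.getElem_of_index?_eq_some hr'
            have hQ' : pvQ d ig ((as ++ l :: bs)[r']) = true := by
              rw [hplr']; simp [pvQ, hget, hh]
            have hler : as.length ≤ r' := hAt r' hrlen' hQ'
            constructor
            · rw [hcp, hc0]; simp; omega
            · intro heq
              rw [hcp] at heq; rw [hc0] at heq
              simp only at heq
              have hrr : r' = r := by omega
              subst hrr
              have hlang : p.2.1 = l := by rw [← hplr']; exact hplr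
              have hvs : p.2.2 = vs := by
                have h2 := hget; rw [hlang, hd] at h2
                exact (Option.some_injective _ h2).symm
              have hhit : hit = v := by
                rw [hvs, hv] at hh
                exact (Option.some_injective _ hh).symm
              rw [hcp, hc0, hlang, hhit]
        · -- fallback candidate: rank ≥ (as ++ l :: bs).length > r
          cases se with
          | true => simp at hcp
          | false =>
            simp at hcp
            have : (((as ++ l :: bs).length : Int)) + p.1 ≥ ((as ++ l :: bs).length : Int) := by omega
            constructor
            · rw [hcp, hc0]; simp; omega
            · intro heq
              rw [hcp] at heq; rw [hc0] at heq
              simp only at heq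
              omega
    have hfold : ((PySem.List.enumerate d.items 0).flatMap
        (pvCands (as ++ l :: bs) ((as ++ l :: bs).length : Int) se ig)).foldl pvMin none = some c0 :=
      pvMin_reach c0 _ hc0mem (fun c hc => (hbound c hc).1)
        (fun c hc => (hbound c hc).2) none (Or.inl rfl)
    rw [hfold]
    simp [hd, hv, hc0]
  | none =>
    -- no preferred language qualifies: all preferred candidates vanish
    have hnoQ : ∀ l ∈ pl, pvQ d ig l = false := by
      intro l hl
      have := List.find?_eq_none.mp hfind l hl
      simpa using this
    have hCeq : (PySem.List.enumerate d.items 0).flatMap (pvCands pl (pl.length : Int) se ig)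
        = (PySem.List.enumerate d.items 0).flatMap
            (fun p => if se then [] else pvFb (pl.length : Int) ig p) := by
      apply List.flatMap_congr
      intro p hp
      rw [PySem.List.mem_enumerate_iff] at hp
      obtain ⟨k, hk, rfl⟩ := hp
      unfold pvCands pvFb
      cases hh : pvB_hit ig (d.items[k]).2 with
      | none => cases se <;> simp [hh]
      | some hit =>
        have hidxnone : PySem.List.index? pl (d.items[k]).1 = none := by
          rw [PySem.List.index?_eq_none_iff]
          intro hmem
          have hget : d.get? (d.items[k]).1 = some (d.items[k]).2 :=
            PySem.Dict.get?_of_mem_items d (by simp [List.getElem_mem]) hn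
          have := hnoQ _ hmem
          simp [pvQ, hget, hh] at this
        rw [PySem.List.index?_eq_idxOf?] at hidxnone
        cases se <;> simp [hh, hidxnone]
    rw [hCeq]
    cases se with
    | true =>
      have : (PySem.List.enumerate d.items 0).flatMap
          (fun p => if true = true then ([] : List (Int × String × String))
                    else pvFb (pl.length : Int) ig p) = [] := by
        simp
      rw [this]
      rfl
    | false =>
      have hsimp : (PySem.List.enumerate d.items 0).flatMap
          (fun p => if false = true then ([] : List (Int × String × String))
                    else pvFb (pl.length : Int) ig p)
          = (PySem.List.enumerate d.items 0).flatMap (pvFb (pl.length : Int) ig) := by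
        simp
      rw [hsimp]
      simp only [Option.bind_none]
      exact (pvFb_fold (pl.length : Int) ig d.items 0).symm

-- ===== VERDICT (by name: the statement is the Claim_ definition above) =====
theorem get_lang_value_with_lang_py_spec : Claim_equal_get_lang_value_with_lang_py := by
  intro lang_dict preferred_langs strict_english ignore_urls _
  show _ = _
  unfold get_lang_value_with_lang_py get_lang_value_with_lang_py_alt
  set d := PySem.Dict.ofList lang_dict with hd
  by_cases hemp : d.items.isEmpty
  · simp [hemp]
  · simp only [hemp, if_false, Bool.false_eq_true]
    exact pv_main d (preferred_langs.getD ["en", "def", ""]) strict_english ignore_urls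
      (PySem.Dict.nodup_keys_ofList lang_dict)
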